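-- pv_equiv track=rewrite | github.com/MGPuneeth/sokoban-solver | backend/solver/heuristics.py | assignment_heuristic
-- ===== SOURCE A (Python) =====
-- def manhattan(a, b):
--     return abs(a[0] - b[0]) + abs(a[1] - b[1])
--
-- def assignment_heuristic(boxes, goals):
--     boxes = list(boxes)
--     goals = list(goals)
--
--     total_cost = 0
--
--     while boxes:
--         min_dist = float('inf')
--         best_pair = None
--
--         for b in boxes:
--             for g in goals:
--                 d = manhattan(b, g)
--                 if d < min_dist:
--                     min_dist = d
--                     best_pair = (b, g)
--
--         b, g = best_pair
--         total_cost += min_dist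
--
--         boxes.remove(b)
--         goals.remove(g)
--
--     return total_cost
-- ===== SOURCE B (Python) =====
-- def assignment_heuristic(boxes, goals):
--     boxes = list(boxes)
--     goals = list(goals)
--     pairs = sorted(
--         (abs(b[0] - g[0]) + abs(b[1] - g[1]), i, j)
--         for i, b in enumerate(boxes)
--         for j, g in enumerate(goals)
--     )
--     used_b = [False] * len(boxes)
--     used_g = [False] * len(goals)
--     total = 0
--     for d, i, j in pairs:
--         if not used_b[i] and not used_g[j]:
--             used_b[i] = True
--             used_g[j] = True
--             total += d
--     return total
-- ===== Notes on version B (the rewrite author's own statement) =====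
-- stated objective: faster
-- what changed: Instead of rescanning all remaining box-goal pairs to find the closest pair in every round (O(n) rounds of an O(n^2) scan with list.remove), B sorts all pairs once by (distance, box index, goal index) and makes a single greedy pass over the sorted list taking each pair whose box and goal are still unused.
import Mathlib
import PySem

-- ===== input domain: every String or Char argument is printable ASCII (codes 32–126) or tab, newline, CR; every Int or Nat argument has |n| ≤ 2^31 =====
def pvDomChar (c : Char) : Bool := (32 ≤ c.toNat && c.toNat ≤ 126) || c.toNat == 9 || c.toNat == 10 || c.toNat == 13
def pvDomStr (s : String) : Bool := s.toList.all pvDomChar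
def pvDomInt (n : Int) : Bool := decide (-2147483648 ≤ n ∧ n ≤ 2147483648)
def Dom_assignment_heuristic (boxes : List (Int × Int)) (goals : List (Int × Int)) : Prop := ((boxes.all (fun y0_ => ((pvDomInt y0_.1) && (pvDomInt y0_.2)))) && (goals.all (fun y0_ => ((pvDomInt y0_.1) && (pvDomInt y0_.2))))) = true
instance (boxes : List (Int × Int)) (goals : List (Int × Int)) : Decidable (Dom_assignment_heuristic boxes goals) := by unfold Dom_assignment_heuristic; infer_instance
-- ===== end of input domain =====

-- B replaces A's repeated O(n^2) rescans for the currently closest (box, goal) pair by one sort of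
-- all pairs by (distance, box index, goal index) followed by a single greedy pass; same return value.

-- ===== PORT A =====
def manhattan (a b : Int × Int) : Int := |a.1 - b.1| + |a.2 - b.2|

-- `d < min_dist` with min_dist initially float('inf'): none plays inf (every Int is below it)
def pyLtInf (d : Int) (md : Option Int) : Bool :=
  match md with
  | none => true
  | some m => decide (d < m)

-- body of the nested `for b in boxes: for g in goals:` loop
def pvScanStep (st : Option Int × Option ((Int × Int) × (Int × Int))) (b g : Int × Int) :
    Option Int × Option ((Int × Int) × (Int × Int)) :=
  let d := manhattan b g
  if pyLtInf d st.1 then (some d, some (b, g)) else st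

def pvScan (boxes goals : List (Int × Int)) : Option Int × Option ((Int × Int) × (Int × Int)) :=
  boxes.foldl (fun st b => goals.foldl (fun st g => pvScanStep st b g) st) (none, none)

-- the while loop; fuel = initial number of boxes (each iteration removes one box).
-- In the `| _ => total` arm Python raises TypeError (unpacking best_pair = None); Pre_ excludes it.
def pvALoop : Nat → List (Int × Int) → List (Int × Int) → Int → Int
  | 0, _, _, total => total
  | fuel + 1, boxes, goals, total =>
    if boxes = [] then total
    else
      match pvScan boxes goals with
      | (some d, some (b, g)) =>
          pvALoop fuel ((PySem.List.remove? boxes b).getD boxes)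
            ((PySem.List.remove? goals g).getD goals) (total + d)
      | _ => total

def assignment_heuristic (boxes : List (Int × Int)) (goals : List (Int × Int)) : Int :=
  pvALoop boxes.length boxes goals 0

-- ===== PORT B =====
-- all (distance, box index, goal index) triples, in enumerate × enumerate order
def pvPairs (boxes goals : List (Int × Int)) : List (Int × Nat × Nat) :=
  (List.range boxes.length).flatMap (fun i =>
    (List.range goals.length).map (fun j =>
      (|(boxes.getD i (0, 0)).1 - (goals.getD j (0, 0)).1| +
         |(boxes.getD i (0, 0)).2 - (goals.getD j (0, 0)).2|, i, j)))

-- Python tuple comparison on (d, i, j): sort key into the lexicographic product order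
def pvKey (p : Int × Nat × Nat) : Lex (Int × Lex (Nat × Nat)) :=
  toLex (p.1, toLex (p.2.1, p.2.2))

-- body of the `for d, i, j in pairs:` loop over state (used_b, used_g, total)
def pvBStep (st : List Bool × List Bool × Int) (p : Int × Nat × Nat) :
    List Bool × List Bool × Int :=
  if !st.1.getD p.2.1 true && !st.2.1.getD p.2.2 true then
    (st.1.set p.2.1 true, st.2.1.set p.2.2 true, st.2.2 + p.1)
  else st

def assignment_heuristic_alt (boxes : List (Int × Int)) (goals : List (Int × Int)) : Int :=
  ((PySem.List.sorted (pvPairs boxes goals) pvKey).foldl pvBStep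
    (List.replicate boxes.length false, List.replicate goals.length false, (0 : Int))).2.2

-- ===== PRECONDITION & SPEC =====
-- Pre_ excludes exactly the inputs with more boxes than goals: there A raises TypeError
-- (best_pair stays None and `b, g = best_pair` fails); B returns a partial-matching cost instead.
def Pre_assignment_heuristic (boxes : List (Int × Int)) (goals : List (Int × Int)) : Prop :=
  boxes.length ≤ goals.length
instance (boxes : List (Int × Int)) (goals : List (Int × Int)) : Decidable (Pre_assignment_heuristic boxes goals) := by unfold Pre_assignment_heuristic; infer_instance

def pvWitness_assignment_heuristic : (List (Int × Int)) × (List (Int × Int)) :=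
  ([(0, 0), (2, 3)], [(1, 1), (5, 5)])

def Spec_assignment_heuristic (boxes : List (Int × Int)) (goals : List (Int × Int)) (out : Int) : Prop := out = assignment_heuristic_alt boxes goals
instance (boxes : List (Int × Int)) (goals : List (Int × Int)) (out : Int) : Decidable (Spec_assignment_heuristic boxes goals out) := by unfold Spec_assignment_heuristic; infer_instance

-- ===== CLAIM (what is proved, stated in full; the proofs are below) =====
def Claim_equal_assignment_heuristic : Prop := ∀ (boxes : List (Int × Int)) (goals : List (Int × Int)), Dom_assignment_heuristic boxes goals → Pre_assignment_heuristic boxes goals → Spec_assignment_heuristic boxes goals (assignment_heuristic boxes goals)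

-- ===== LEMMAS AND PROOFS =====

-- common abstract layer: index lists, triple lists, the reference greedy
def pvDfun (bx gl : Nat → Int × Int) (i j : Nat) : Int := manhattan (bx i) (gl j)

def pvRow (D : Nat → Nat → Int) (i : Nat) (J : List Nat) : List (Int × Nat × Nat) :=
  J.map (fun j => (D i j, i, j))

def pvAllT (D : Nat → Nat → Int) (I J : List Nat) : List (Int × Nat × Nat) :=
  I.flatMap (fun i => pvRow D i J)

def pvMerge : Option (Int × Nat × Nat) → Option (Int × Nat × Nat) → Option (Int × Nat × Nat)
  | none, b => b
  | some a, none => some a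
  | some a, some b => if a.1 ≤ b.1 then some a else some b

-- first element with minimal first component
def pvFirstMin : List (Int × Nat × Nat) → Option (Int × Nat × Nat)
  | [] => none
  | p :: l => pvMerge (some p) (pvFirstMin l)

def pvGreedy (D : Nat → Nat → Int) : Nat → List Nat → List Nat → Int
  | 0, _, _ => 0
  | fuel + 1, I, J =>
    match pvFirstMin (pvAllT D I J) with
    | none => 0
    | some (d, i, j) => d + pvGreedy D fuel (I.erase i) (J.erase j)

def pvToV (bx gl : Nat → Int × Int) (r : Int × Nat × Nat) : (Int × Int) × (Int × Int) :=
  (bx r.2.1, gl r.2.2)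

def pvCombine (bx gl : Nat → Int × Int) (st : Option Int × Option ((Int × Int) × (Int × Int)))
    (r : Option (Int × Nat × Nat)) : Option Int × Option ((Int × Int) × (Int × Int)) :=
  match r with
  | none => st
  | some r => if pyLtInf r.1 st.1 then (some r.1, some (pvToV bx gl r)) else st

lemma pvFirstMin_none_iff (T : List (Int × Nat × Nat)) : pvFirstMin T = none ↔ T = [] := by
  cases T with
  | nil => simp [pvFirstMin]
  | cons p l =>
    simp only [pvFirstMin]
    cases pvFirstMin l <;> simp [pvMerge] <;> split_ifs <;> simp

lemma pvFirstMin_mem {T : List (Int × Nat × Nat)} {r} (h : pvFirstMin T = some r) : r ∈ T := by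
  induction T with
  | nil => simp [pvFirstMin] at h
  | cons p l ih =>
    simp only [pvFirstMin] at h
    cases hl : pvFirstMin l with
    | none => rw [hl] at h; simp [pvMerge] at h; simp [h]
    | some q =>
      rw [hl] at h; simp only [pvMerge] at h
      split at h
      · simp at h; simp [h]
      · simp at h; subst h; exact List.mem_cons_of_mem _ (ih hl)

lemma pvFirstMin_min {T : List (Int × Nat × Nat)} {r} (h : pvFirstMin T = some r) :
    ∀ x ∈ T, r.1 ≤ x.1 := by
  induction T generalizing r with
  | nil => simp [pvFirstMin] at h
  | cons p l ih =>
    simp only [pvFirstMin] at h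
    cases hl : pvFirstMin l with
    | none =>
      rw [hl] at h
      have : l = [] := (pvFirstMin_none_iff l).mp hl
      subst this; simp [pvMerge] at h; simp [h]
    | some q =>
      rw [hl] at h; simp only [pvMerge] at h
      split at h <;> simp at h <;> subst h
      · intro x hx
        rcases List.mem_cons.mp hx with rfl | hx
        · exact le_refl _
        · exact le_trans (by assumption) (ih hl x hx)
      · intro x hx
        rcases List.mem_cons.mp hx with rfl | hx
        · omega
        · exact ih hl x hx

lemma pvMerge_assoc (a b c : Option (Int × Nat × Nat)) :
    pvMerge (pvMerge a b) c = pvMerge a (pvMerge b c) := by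
  rcases a with _ | a
  · rfl
  rcases b with _ | b
  · rfl
  rcases c with _ | c
  · by_cases h1 : a.1 ≤ b.1 <;> simp [pvMerge, h1]
  by_cases h1 : a.1 ≤ b.1 <;> by_cases h2 : b.1 ≤ c.1 <;> by_cases h3 : a.1 ≤ c.1 <;>
    simp [pvMerge, h1, h2, h3] <;> (try (exfalso; omega))

lemma pvFirstMin_append (A B : List (Int × Nat × Nat)) :
    pvFirstMin (A ++ B) = pvMerge (pvFirstMin A) (pvFirstMin B) := by
  induction A with
  | nil => simp [pvFirstMin, pvMerge]
  | cons p A ih => simp only [List.cons_append, pvFirstMin, ih, ← pvMerge_assoc]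

lemma mem_pvRow {D : Nat → Nat → Int} {i : Nat} {J : List Nat} {x} :
    x ∈ pvRow D i J ↔ ∃ j ∈ J, x = (D i j, i, j) := by
  simp [pvRow, List.mem_map, eq_comm]

lemma mem_pvAllT {D : Nat → Nat → Int} {I J : List Nat} {x} :
    x ∈ pvAllT D I J ↔ ∃ i ∈ I, ∃ j ∈ J, x = (D i j, i, j) := by
  simp [pvAllT, List.mem_flatMap, mem_pvRow]

lemma pvCombine_merge (bx gl : Nat → Int × Int) (st : Option Int × Option ((Int × Int) × (Int × Int)))
    (a b : Option (Int × Nat × Nat)) :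
    pvCombine bx gl (pvCombine bx gl st a) b = pvCombine bx gl st (pvMerge a b) := by
  rcases a with _ | p
  · rfl
  rcases b with _ | q
  · rfl
  obtain ⟨mo, bp⟩ := st
  rcases mo with _ | m
  · by_cases h1 : p.1 ≤ q.1 <;> by_cases h2 : q.1 < p.1 <;>
      simp [pvCombine, pvMerge, pyLtInf, h1, h2] <;> (exfalso; omega)
  · by_cases h1 : p.1 ≤ q.1 <;> by_cases h2 : q.1 < p.1 <;>
      by_cases h3 : p.1 < m <;> by_cases h4 : q.1 < m <;>
      simp [pvCombine, pvMerge, pyLtInf, h1, h2, h3, h4] <;> (exfalso; omega)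

lemma pvRow_fold (bx gl : Nat → Int × Int) (i : Nat) :
    ∀ (J : List Nat) st, J.foldl (fun st j => pvScanStep st (bx i) (gl j)) st =
      pvCombine bx gl st (pvFirstMin (pvRow (pvDfun bx gl) i J)) := by
  intro J
  induction J with
  | nil => intro st; rfl
  | cons j J ih =>
    intro st
    simp only [List.foldl_cons]
    rw [ih, show pvScanStep st (bx i) (gl j) =
      pvCombine bx gl st (some (pvDfun bx gl i j, i, j)) from rfl, pvCombine_merge]
    rfl

lemma pvScanOuter (bx gl : Nat → Int × Int) (J : List Nat) :
    ∀ (I : List Nat) st,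
      I.foldl (fun st i => J.foldl (fun st j => pvScanStep st (bx i) (gl j)) st) st =
        pvCombine bx gl st (pvFirstMin (pvAllT (pvDfun bx gl) I J)) := by
  intro I
  induction I with
  | nil => intro st; rfl
  | cons i I ih =>
    intro st
    simp only [List.foldl_cons]
    rw [pvRow_fold, ih, pvCombine_merge, show pvAllT (pvDfun bx gl) (i :: I) J =
      pvRow (pvDfun bx gl) i J ++ pvAllT (pvDfun bx gl) I J from List.flatMap_cons ..,
      pvFirstMin_append]

lemma pvScan_eq (bx gl : Nat → Int × Int) (I J : List Nat) :
    pvScan (I.map bx) (J.map gl) =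
      pvCombine bx gl (none, none) (pvFirstMin (pvAllT (pvDfun bx gl) I J)) := by
  unfold pvScan
  simp only [List.foldl_map]
  exact pvScanOuter bx gl J I (none, none)

lemma pvAllT_cons (D : Nat → Nat → Int) (i : Nat) (I J : List Nat) :
    pvAllT D (i :: I) J = pvRow D i J ++ pvAllT D I J := List.flatMap_cons ..

lemma pvRemove_box (bx gl : Nat → Int × Int) {d : Int} {i j : Nat} :
    ∀ {I : List Nat} {J : List Nat},
      pvFirstMin (pvAllT (pvDfun bx gl) I J) = some (d, i, j) →
      PySem.List.remove? (I.map bx) (bx i) = some ((I.erase i).map bx) := by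
  intro I
  induction I with
  | nil => intro J h; simp [pvAllT, pvFirstMin] at h
  | cons i₀ I ih =>
    intro J h
    rw [pvAllT_cons, pvFirstMin_append] at h
    by_cases hi : i₀ = i
    · subst hi
      simp [PySem.List.remove?_cons_self]
    · cases hfa : pvFirstMin (pvRow (pvDfun bx gl) i₀ J) with
      | none =>
        rw [hfa] at h
        have hJ : J = [] := by
          have := (pvFirstMin_none_iff _).mp hfa
          simpa [pvRow, List.map_eq_nil_iff] using this
        have hmem := pvFirstMin_mem (show pvFirstMin (pvAllT (pvDfun bx gl) I J) = some (d, i, j) from h)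
        rcases mem_pvAllT.mp hmem with ⟨i', _, j', hj', _⟩
        simp [hJ] at hj'
      | some a =>
        have hai : a.2.1 = i₀ := by
          rcases mem_pvRow.mp (pvFirstMin_mem hfa) with ⟨j', _, rfl⟩; rfl
        cases hfb : pvFirstMin (pvAllT (pvDfun bx gl) I J) with
        | none =>
          rw [hfa, hfb] at h
          simp [pvMerge] at h
          exact absurd (show i₀ = i by rw [← hai, h]) hi
        | some b =>
          rw [hfa, hfb] at h
          simp only [pvMerge] at h
          by_cases hab : a.1 ≤ b.1
          · rw [if_pos hab] at h
            simp at h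
            exact absurd (show i₀ = i by rw [← hai, h]) hi
          · rw [if_neg hab] at h
            simp at h
            subst h
            have hne : bx i₀ ≠ bx i := by
              intro he
              rcases mem_pvAllT.mp (pvFirstMin_mem hfb) with ⟨i', hi', j', hj', heq⟩
              have hjJ : j ∈ J := by
                have : j' = j := by simpa using (congrArg (fun x => x.2.2) heq).symm
                rwa [this] at hj'
              have hd : d = pvDfun bx gl i j := by
                have h1 : i' = i := by simpa using (congrArg (fun x => x.2.1) heq).symm
                have h2 : j' = j := by simpa using (congrArg (fun x => x.2.2) heq).symm
                have := congrArg (fun x => x.1) heq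
                rw [h1, h2] at this
                simpa using this
              have hmm := pvFirstMin_min hfa _ (mem_pvRow.mpr ⟨j, hjJ, rfl⟩)
              simp only at hmm
              have : pvDfun bx gl i₀ j = pvDfun bx gl i j := by
                simp [pvDfun, he]
              omega
            rw [List.map_cons, PySem.List.remove?_cons_of_ne _ hne, ih hfb,
              List.erase_cons_tail (by simpa using hi)]
            rfl

lemma pvChosen_row {D : Nat → Nat → Int} {d : Int} {i j : Nat} :
    ∀ {I J : List Nat}, pvFirstMin (pvAllT D I J) = some (d, i, j) →
      pvFirstMin (pvRow D i J) = some (d, i, j) := by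
  intro I
  induction I with
  | nil => intro J h; simp [pvAllT, pvFirstMin] at h
  | cons i₀ I ih =>
    intro J h
    rw [pvAllT_cons, pvFirstMin_append] at h
    cases hfa : pvFirstMin (pvRow D i₀ J) with
    | none =>
      rw [hfa] at h
      exact ih h
    | some a =>
      have hai : a.2.1 = i₀ := by
        rcases mem_pvRow.mp (pvFirstMin_mem hfa) with ⟨j', _, rfl⟩; rfl
      cases hfb : pvFirstMin (pvAllT D I J) with
      | none =>
        rw [hfa, hfb] at h
        simp [pvMerge] at h
        have hio : i₀ = i := by rw [← hai, h]
        subst hio; rw [hfa, h]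
      | some b =>
        rw [hfa, hfb] at h
        simp only [pvMerge] at h
        by_cases hab : a.1 ≤ b.1
        · rw [if_pos hab] at h
          simp at h
          have hio : i₀ = i := by rw [← hai, h]
          subst hio; rw [hfa, h]
        · rw [if_neg hab] at h
          simp at h
          subst h
          exact ih hfb

lemma pvRemove_goal (bx gl : Nat → Int × Int) {d : Int} {i j : Nat} :
    ∀ {J : List Nat}, pvFirstMin (pvRow (pvDfun bx gl) i J) = some (d, i, j) →
      PySem.List.remove? (J.map gl) (gl j) = some ((J.erase j).map gl) := by
  intro J
  induction J with
  | nil => intro h; simp [pvRow, pvFirstMin] at h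
  | cons j₀ J ih =>
    intro h
    by_cases hj : j₀ = j
    · subst hj
      simp [PySem.List.remove?_cons_self]
    · have hcons : pvRow (pvDfun bx gl) i (j₀ :: J) =
        (pvDfun bx gl i j₀, i, j₀) :: pvRow (pvDfun bx gl) i J := rfl
      rw [hcons] at h
      rw [show pvFirstMin ((pvDfun bx gl i j₀, i, j₀) :: pvRow (pvDfun bx gl) i J) =
        pvMerge (some (pvDfun bx gl i j₀, i, j₀)) (pvFirstMin (pvRow (pvDfun bx gl) i J))
        from rfl] at h
      cases hf : pvFirstMin (pvRow (pvDfun bx gl) i J) with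
      | none =>
        rw [hf] at h
        simp [pvMerge, Prod.ext_iff] at h
        exact absurd h.2 hj
      | some q =>
        rw [hf] at h
        simp only [pvMerge] at h
        by_cases hpq : pvDfun bx gl i j₀ ≤ q.1
        · rw [if_pos hpq] at h
          simp [Prod.ext_iff] at h
          exact absurd h.2 hj
        · rw [if_neg hpq] at h
          simp at h
          subst h
          have hd : d = pvDfun bx gl i j := by
            rcases mem_pvRow.mp (pvFirstMin_mem hf) with ⟨j', hj', heq⟩
            have h2 : j' = j := by simpa using (congrArg (fun x => x.2.2) heq).symm
            have := congrArg (fun x => x.1) heq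
            rw [h2] at this
            simpa using this
          have hne : gl j₀ ≠ gl j := by
            intro he
            have : pvDfun bx gl i j₀ = pvDfun bx gl i j := by simp [pvDfun, he]
            omega
          rw [List.map_cons, PySem.List.remove?_cons_of_ne _ hne, ih hf,
            List.erase_cons_tail (by simpa using hj)]
          rfl

lemma pvALoop_eq (bx gl : Nat → Int × Int) :
    ∀ (fuel : Nat) (I J : List Nat) (t : Int), I.length ≤ fuel → I.length ≤ J.length →
      pvALoop fuel (I.map bx) (J.map gl) t = t + pvGreedy (pvDfun bx gl) fuel I J := by
  intro fuel
  induction fuel with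
  | zero =>
    intro I J t h1 _
    have : I = [] := List.eq_nil_of_length_eq_zero (by omega)
    subst this
    simp [pvALoop, pvGreedy]
  | succ fuel ih =>
    intro I J t h1 h2
    cases I with
    | nil => simp [pvALoop, pvGreedy, pvAllT, pvFirstMin]
    | cons i₀ I =>
      cases hfm : pvFirstMin (pvAllT (pvDfun bx gl) (i₀ :: I) J) with
      | none =>
        have : pvAllT (pvDfun bx gl) (i₀ :: I) J = [] := (pvFirstMin_none_iff _).mp hfm
        rw [pvAllT_cons] at this
        have hrow := List.append_eq_nil_iff.mp this |>.1
        have hJ : J = [] := by simpa [pvRow, List.map_eq_nil_iff] using hrow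
        subst hJ
        simp at h2
      | some r =>
        obtain ⟨d, i, j⟩ := r
        rcases mem_pvAllT.mp (pvFirstMin_mem hfm) with ⟨i', hiI, j', hjJ, heq⟩
        have hii : i' = i := by simpa using (congrArg (fun x => x.2.1) heq).symm
        have hjj : j' = j := by simpa using (congrArg (fun x => x.2.2) heq).symm
        rw [hii] at hiI; rw [hjj] at hjJ
        have hstep : pvALoop (fuel + 1) ((i₀ :: I).map bx) (J.map gl) t =
            pvALoop fuel (((i₀ :: I).erase i).map bx) ((J.erase j).map gl) (t + d) := by
          rw [show pvALoop (fuel + 1) ((i₀ :: I).map bx) (J.map gl) t =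
            (if (i₀ :: I).map bx = [] then t
             else match pvScan ((i₀ :: I).map bx) (J.map gl) with
              | (some d, some (b, g)) =>
                  pvALoop fuel ((PySem.List.remove? ((i₀ :: I).map bx) b).getD ((i₀ :: I).map bx))
                    ((PySem.List.remove? (J.map gl) g).getD (J.map gl)) (t + d)
              | _ => t) from rfl]
          rw [if_neg (by simp)]
          rw [pvScan_eq, hfm]
          rw [show pvCombine bx gl (none, none) (some (d, i, j)) =
            (some d, some (bx i, gl j)) from rfl]
          change pvALoop fuel
              ((PySem.List.remove? ((i₀ :: I).map bx) (bx i)).getD ((i₀ :: I).map bx))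
              ((PySem.List.remove? (J.map gl) (gl j)).getD (J.map gl)) (t + d) = _
          rw [pvRemove_box bx gl hfm, pvRemove_goal bx gl (pvChosen_row hfm)]
          rfl
        simp only [List.length_cons] at h1 h2
        rw [hstep, ih _ _ _
          (by rw [List.length_erase_of_mem hiI, List.length_cons]; omega)
          (by rw [List.length_erase_of_mem hiI, List.length_erase_of_mem hjJ, List.length_cons]
              have := List.length_pos_of_mem hjJ
              omega)]
        have hg : pvGreedy (pvDfun bx gl) (fuel + 1) (i₀ :: I) J =
            d + pvGreedy (pvDfun bx gl) fuel ((i₀ :: I).erase i) (J.erase j) := by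
          simp only [pvGreedy, hfm]
        rw [hg]
        omega

-- B side
def pvAvail (ub : List Bool) : List Nat :=
  (List.range ub.length).filter (fun i => !ub.getD i true)

def pvIjlt (a b : Int × Nat × Nat) : Prop :=
  a.2.1 < b.2.1 ∨ (a.2.1 = b.2.1 ∧ a.2.2 < b.2.2)

def pvLexle (a b : Int × Nat × Nat) : Prop :=
  a.1 < b.1 ∨ (a.1 = b.1 ∧ (a.2.1 < b.2.1 ∨ (a.2.1 = b.2.1 ∧ a.2.2 ≤ b.2.2)))

lemma pvKey_le_iff {a b : Int × Nat × Nat} : pvKey a ≤ pvKey b ↔ pvLexle a b := by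
  simp [pvKey, pvLexle, Prod.Lex.le_iff]

lemma mem_pvAvail {ub : List Bool} {i : Nat} :
    i ∈ pvAvail ub ↔ i < ub.length ∧ ub.getD i true = false := by
  simp [pvAvail, List.mem_filter]

lemma pvAvail_pairwise (ub : List Bool) : (pvAvail ub).Pairwise (· < ·) :=
  List.pairwise_lt_range.filter _

lemma pvGetD_set_self {l : List Bool} {i : Nat} (h : i < l.length) :
    (l.set i true).getD i true = true := by
  simp [List.getD_eq_getElem?_getD, List.getElem?_set, h]

lemma pvGetD_set_ne {l : List Bool} {i k : Nat} (h : k ≠ i) :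
    (l.set i true).getD k true = l.getD k true := by
  simp [List.getD_eq_getElem?_getD, List.getElem?_set, (Ne.symm h : i ≠ k)]

lemma pvAvail_set {ub : List Bool} {i : Nat} (hi : i < ub.length)
    (hf : ub.getD i true = false) : pvAvail (ub.set i true) = (pvAvail ub).erase i := by
  have hnd : (pvAvail ub).Nodup := (pvAvail_pairwise ub).nodup
  rw [List.Nodup.erase_eq_filter hnd]
  unfold pvAvail
  rw [List.length_set, List.filter_filter]
  apply List.filter_congr
  intro k hk
  by_cases hki : k = i
  · subst hki
    rw [pvGetD_set_self hi, hf]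
    simp
  · rw [pvGetD_set_ne hki]
    simp [hki]

lemma pvAvail_replicate (n : Nat) : pvAvail (List.replicate n false) = List.range n := by
  unfold pvAvail
  rw [List.length_replicate]
  apply List.filter_eq_self.mpr
  intro a ha
  simp [List.getD_eq_getElem?_getD, List.getElem?_replicate, List.mem_range.mp ha]

lemma pvAllT_pairwise {D : Nat → Nat → Int} {I J : List Nat} (hI : I.Pairwise (· < ·))
    (hJ : J.Pairwise (· < ·)) : (pvAllT D I J).Pairwise pvIjlt := by
  induction I with
  | nil => simp [pvAllT]
  | cons i₀ I ih =>
    rw [pvAllT_cons, List.pairwise_append]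
    obtain ⟨hhd, htl⟩ := List.pairwise_cons.mp hI
    refine ⟨?_, ih htl, ?_⟩
    · unfold pvRow
      rw [List.pairwise_map]
      exact hJ.imp (fun h => Or.inr ⟨rfl, h⟩)
    · intro x hx y hy
      rcases mem_pvRow.mp hx with ⟨j₁, _, rfl⟩
      rcases mem_pvAllT.mp hy with ⟨i₁, hi₁, j₂, _, rfl⟩
      exact Or.inl (hhd i₁ hi₁)

lemma pvFirstMin_of_lexmin {T : List (Int × Nat × Nat)} {p : Int × Nat × Nat} (hp : p ∈ T)
    (hmin : ∀ x ∈ T, pvLexle p x) (hpw : T.Pairwise pvIjlt) : pvFirstMin T = some p := by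
  induction T with
  | nil => simp at hp
  | cons q T ih =>
    rcases List.mem_cons.mp hp with rfl | hp'
    · cases hf : pvFirstMin T with
      | none => simp [pvFirstMin, hf, pvMerge]
      | some r =>
        have hr : pvLexle p r := hmin r (List.mem_cons_of_mem _ (pvFirstMin_mem hf))
        have : p.1 ≤ r.1 := by unfold pvLexle at hr; omega
        simp [pvFirstMin, hf, pvMerge, this]
    · have hqp : pvIjlt q p := (List.pairwise_cons.mp hpw).1 p hp'
      have hpq : pvLexle p q := hmin q List.mem_cons_self
      have hlt : p.1 < q.1 := by unfold pvLexle at hpq; unfold pvIjlt at hqp; omega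
      have hf : pvFirstMin T = some p :=
        ih hp' (fun x hx => hmin x (List.mem_cons_of_mem _ hx)) (List.pairwise_cons.mp hpw).2
      simp [pvFirstMin, hf, pvMerge]
      omega

lemma pvGreedy_nil {D : Nat → Nat → Int} {I J : List Nat} (h : pvAllT D I J = []) (fuel : Nat) :
    pvGreedy D fuel I J = 0 := by
  cases fuel with
  | zero => rfl
  | succ fuel => simp [pvGreedy, h, pvFirstMin]

lemma pvBfold_eq (D : Nat → Nat → Int) :
    ∀ (S : List (Int × Nat × Nat)) (ub ug : List Bool) (t : Int) (fuel : Nat),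
      S.Pairwise (fun a b => pvKey a ≤ pvKey b) →
      (∀ x ∈ S, x.2.1 < ub.length ∧ x.2.2 < ug.length ∧ x.1 = D x.2.1 x.2.2) →
      (∀ i j, i < ub.length → j < ug.length → ub.getD i true = false →
        ug.getD j true = false → (D i j, i, j) ∈ S) →
      (pvAvail ub).length ≤ fuel →
      (S.foldl pvBStep (ub, ug, t)).2.2 = t + pvGreedy D fuel (pvAvail ub) (pvAvail ug) := by
  intro S
  induction S with
  | nil =>
    intro ub ug t fuel hs hcan hcomp hfuel
    simp only [List.foldl_nil]
    have hnil : pvAllT D (pvAvail ub) (pvAvail ug) = [] := by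
      cases hA : pvAvail ub with
      | nil => simp [pvAllT]
      | cons i Is =>
        cases hB : pvAvail ug with
        | nil => simp [pvAllT, pvRow]
        | cons j Js =>
          exfalso
          have hi := mem_pvAvail.mp (hA ▸ List.mem_cons_self)
          have hj := mem_pvAvail.mp (hB ▸ List.mem_cons_self)
          simpa using hcomp i j hi.1 hj.1 hi.2 hj.2
    rw [pvGreedy_nil hnil]
    omega
  | cons p S ih =>
    obtain ⟨dp, pi, pj⟩ := p
    intro ub ug t fuel hs hcan hcomp hfuel
    obtain ⟨hpi, hpj, hpd⟩ := hcan _ List.mem_cons_self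
    dsimp only at hpi hpj hpd
    simp only [List.foldl_cons]
    by_cases hc : ub.getD pi true = false ∧ ug.getD pj true = false
    · have hstep : pvBStep (ub, ug, t) (dp, pi, pj) =
          (ub.set pi true, ug.set pj true, t + dp) := by
        show (if !ub.getD pi true && !ug.getD pj true then
            (ub.set pi true, ug.set pj true, t + dp) else (ub, ug, t)) =
          (ub.set pi true, ug.set pj true, t + dp)
        rw [hc.1, hc.2]
        rfl
      rw [hstep]
      have hpiA : pi ∈ pvAvail ub := mem_pvAvail.mpr ⟨hpi, hc.1⟩
      have hpjA : pj ∈ pvAvail ug := mem_pvAvail.mpr ⟨hpj, hc.2⟩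
      have hfm : pvFirstMin (pvAllT D (pvAvail ub) (pvAvail ug)) = some (dp, pi, pj) := by
        apply pvFirstMin_of_lexmin
        · exact mem_pvAllT.mpr ⟨pi, hpiA, pj, hpjA, by rw [← hpd]⟩
        · intro x hx
          rcases mem_pvAllT.mp hx with ⟨i', hi', j', hj', rfl⟩
          have hmi := mem_pvAvail.mp hi'
          have hmj := mem_pvAvail.mp hj'
          rcases List.mem_cons.mp (hcomp i' j' hmi.1 hmj.1 hmi.2 hmj.2) with heq | hxS'
          · rw [heq]
            unfold pvLexle
            omega
          · exact pvKey_le_iff.mp ((List.pairwise_cons.mp hs).1 _ hxS')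
        · exact pvAllT_pairwise (pvAvail_pairwise ub) (pvAvail_pairwise ug)
      cases fuel with
      | zero =>
        exfalso
        have := List.length_pos_of_mem hpiA
        omega
      | succ fuel =>
        have hg : pvGreedy D (fuel + 1) (pvAvail ub) (pvAvail ug) =
            dp + pvGreedy D fuel ((pvAvail ub).erase pi) ((pvAvail ug).erase pj) := by
          simp only [pvGreedy, hfm]
        rw [hg, ← pvAvail_set hpi hc.1, ← pvAvail_set hpj hc.2]
        rw [ih (ub.set pi true) (ug.set pj true) (t + dp) fuel
          (List.pairwise_cons.mp hs).2
          (by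
            intro x hx
            have := hcan x (List.mem_cons_of_mem _ hx)
            simpa [List.length_set] using this)
          (by
            intro i j hi hj hfi hfj
            rw [List.length_set] at hi hj
            have hnei : i ≠ pi := by
              intro h
              subst h
              rw [pvGetD_set_self hpi] at hfi
              simp at hfi
            have hnej : j ≠ pj := by
              intro h
              subst h
              rw [pvGetD_set_self hpj] at hfj
              simp at hfj
            rw [pvGetD_set_ne hnei] at hfi
            rw [pvGetD_set_ne hnej] at hfj
            rcases List.mem_cons.mp (hcomp i j hi hj hfi hfj) with heq | h'
            · exact absurd (by simpa using congrArg (fun x => x.2.1) heq) hnei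
            · exact h')
          (by
            rw [pvAvail_set hpi hc.1, List.length_erase_of_mem hpiA]
            have := List.length_pos_of_mem hpiA
            omega)]
        omega
    · have hstep : pvBStep (ub, ug, t) (dp, pi, pj) = (ub, ug, t) := by
        show (if !ub.getD pi true && !ug.getD pj true then
            (ub.set pi true, ug.set pj true, t + dp) else (ub, ug, t)) = (ub, ug, t)
        cases hA : ub.getD pi true <;> cases hB : ug.getD pj true <;>
          first | rfl | exact absurd ⟨hA, hB⟩ hc
      rw [hstep]
      apply ih ub ug t fuel (List.pairwise_cons.mp hs).2
        (fun x hx => hcan x (List.mem_cons_of_mem _ hx))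
        (by
          intro i j hi hj hfi hfj
          rcases List.mem_cons.mp (hcomp i j hi hj hfi hfj) with heq | h'
          · exfalso
            have h1 : i = pi := by simpa using congrArg (fun x => x.2.1) heq
            have h2 : j = pj := by simpa using congrArg (fun x => x.2.2) heq
            rw [h1] at hfi
            rw [h2] at hfj
            exact hc ⟨hfi, hfj⟩
          · exact h')
        hfuel

lemma pvMap_getD_range (l : List (Int × Int)) :
    (List.range l.length).map (fun i => l.getD i (0, 0)) = l := by
  refine List.ext_getElem (by simp) ?_
  intro i h1 h2
  simp [List.getD_eq_getElem?_getD, List.getElem?_eq_getElem, h2]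

lemma pvPairs_eq (boxes goals : List (Int × Int)) :
    pvPairs boxes goals =
      pvAllT (pvDfun (fun i => boxes.getD i (0, 0)) (fun j => goals.getD j (0, 0)))
        (List.range boxes.length) (List.range goals.length) := rfl

lemma pvAlt_eq (boxes goals : List (Int × Int)) :
    assignment_heuristic_alt boxes goals =
      pvGreedy (pvDfun (fun i => boxes.getD i (0, 0)) (fun j => goals.getD j (0, 0)))
        boxes.length (List.range boxes.length) (List.range goals.length) := by
  have h := pvBfold_eq (pvDfun (fun i => boxes.getD i (0, 0)) (fun j => goals.getD j (0, 0)))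
    (PySem.List.sorted (pvPairs boxes goals) pvKey)
    (List.replicate boxes.length false) (List.replicate goals.length false) 0 boxes.length
    (PySem.List.sorted_pairwise _ pvKey)
    (by
      intro x hx
      rw [PySem.List.mem_sorted, pvPairs_eq] at hx
      rcases mem_pvAllT.mp hx with ⟨i, hi, j, hj, rfl⟩
      exact ⟨by simpa using List.mem_range.mp hi, by simpa using List.mem_range.mp hj, rfl⟩)
    (by
      intro i j hi hj _ _
      rw [List.length_replicate] at hi hj
      rw [PySem.List.mem_sorted, pvPairs_eq]
      exact mem_pvAllT.mpr ⟨i, List.mem_range.mpr hi, j, List.mem_range.mpr hj, rfl⟩)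
    (by rw [pvAvail_replicate, List.length_range])
  rw [pvAvail_replicate, pvAvail_replicate] at h
  unfold assignment_heuristic_alt
  rw [h]
  omega

-- ===== VERDICT (by name: the statement is the Claim_ definition above) =====
theorem assignment_heuristic_spec : Claim_equal_assignment_heuristic := by
  intro boxes goals _ hpre
  unfold Spec_assignment_heuristic
  unfold assignment_heuristic
  have hA := pvALoop_eq (fun i => boxes.getD i (0, 0)) (fun j => goals.getD j (0, 0))
    boxes.length (List.range boxes.length) (List.range goals.length) 0
    (by simp) (by simpa [Pre_assignment_heuristic] using hpre)
  rw [pvMap_getD_range, pvMap_getD_range] at hA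
  rw [hA, pvAlt_eq]
  omega
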